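-- pv_equiv track=rewrite | github.com/0h328/TIL | 0810/bruno/4835_구간합/s1_4835.py | sum_sec
-- ===== SOURCE A (Python) =====
-- def sum_sec(N, M, arr):
--     max_sum = 0
--     min_sum = 10000 * M
--
--     for i in range(0, N-M+1):
--         summ = 0
--         for j in range(M):
--             summ += arr[i+j]
--
--         if summ > max_sum:
--             max_sum = summ
--         if summ < min_sum:
--             min_sum = summ
--
--     return max_sum - min_sum
-- ===== SOURCE B (Python) =====
-- def sum_sec(N, M, arr):
--     # Sliding-window running sum: one pass, no per-window re-summation.
--     max_sum = 0
--     min_sum = 10000 * M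
--     if 1 <= M <= N:
--         s = sum(arr[:M])
--         max_sum = max(max_sum, s)
--         min_sum = min(min_sum, s)
--         for i in range(M, N):
--             s += arr[i] - arr[i - M]
--             max_sum = max(max_sum, s)
--             min_sum = min(min_sum, s)
--     return max_sum - min_sum
-- ===== Notes on version B (the rewrite author's own statement) =====
-- stated objective: alternative
-- what changed: Replaced the nested loop that re-sums each length-M window from scratch with a single sliding-window pass that maintains a running window sum (add the entering element, drop the leaving one).
import Mathlib
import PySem

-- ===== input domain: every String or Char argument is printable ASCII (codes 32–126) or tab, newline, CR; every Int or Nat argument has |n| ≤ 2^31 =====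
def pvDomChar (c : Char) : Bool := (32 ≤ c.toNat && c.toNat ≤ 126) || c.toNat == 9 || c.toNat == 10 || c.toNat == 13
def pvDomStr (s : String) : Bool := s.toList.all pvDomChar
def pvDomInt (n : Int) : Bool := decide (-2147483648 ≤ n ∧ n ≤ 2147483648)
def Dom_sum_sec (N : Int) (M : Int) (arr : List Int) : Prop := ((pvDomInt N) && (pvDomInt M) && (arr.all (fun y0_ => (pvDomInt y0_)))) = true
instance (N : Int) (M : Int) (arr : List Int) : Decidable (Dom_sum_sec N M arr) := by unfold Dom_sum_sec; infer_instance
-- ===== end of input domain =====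

-- B replaces A's per-window re-summation by a single sliding-window pass with a running window sum.

-- ===== PORT A =====
def sum_sec (N : Int) (M : Int) (arr : List Int) : Int :=
  let st := (PySem.List.pyRange 0 (N - M + 1) 1).foldl
    (fun (st : Int × Int) i =>
      let summ := (PySem.List.pyRange 0 M 1).foldl
        (fun s j => s + PySem.List.pyGetD arr (i + j) 0) 0
      (if summ > st.1 then summ else st.1,
       if summ < st.2 then summ else st.2))
    (0, 10000 * M)
  st.1 - st.2

-- ===== PORT B =====
def sum_sec_alt (N : Int) (M : Int) (arr : List Int) : Int :=
  if 1 ≤ M ∧ M ≤ N then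
    let s0 := (PySem.List.slice arr (some 0) (some M)).sum
    let st := (PySem.List.pyRange M N 1).foldl
      (fun (st : Int × Int × Int) i =>
        let s := st.2.2 + PySem.List.pyGetD arr i 0 - PySem.List.pyGetD arr (i - M) 0
        (max st.1 s, min st.2.1 s, s))
      (max 0 s0, min (10000 * M) s0, s0)
    st.1 - st.2.1
  else 0 - 10000 * M

-- ===== PRECONDITION & SPEC =====
-- Pre_ excludes exactly the inputs on which Python A raises IndexError: a real window range (1 ≤ M ≤ N) with N exceeding len(arr).
def Pre_sum_sec (N : Int) (M : Int) (arr : List Int) : Prop := 1 ≤ M → M ≤ N → N ≤ (arr.length : Int)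
instance (N : Int) (M : Int) (arr : List Int) : Decidable (Pre_sum_sec N M arr) := by unfold Pre_sum_sec; infer_instance
def pvWitness_sum_sec : Int × Int × List Int := (4, 2, [1, 2, 3, 4])

def Spec_sum_sec (N : Int) (M : Int) (arr : List Int) (out : Int) : Prop := out = sum_sec_alt N M arr
instance (N : Int) (M : Int) (arr : List Int) (out : Int) : Decidable (Spec_sum_sec N M arr out) := by unfold Spec_sum_sec; infer_instance

-- ===== CLAIM (what is proved, stated in full; the proofs are below) =====
def Claim_equal_sum_sec : Prop := ∀ (N : Int) (M : Int) (arr : List Int), Dom_sum_sec N M arr → Pre_sum_sec N M arr → Spec_sum_sec N M arr (sum_sec N M arr)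

-- ===== LEMMAS AND PROOFS =====

-- window sum starting at position k (length M.toNat)
def winSum (arr : List Int) (M : Int) (k : Nat) : Int := ((arr.drop k).take M.toNat).sum

-- sum of indexed reads equals sum of the corresponding segment
lemma sum_range_getD (xs : List Int) (a m : Nat) (h : a + m ≤ xs.length) :
    ((List.range m).map (fun k => xs.getD (a + k) 0)).sum = ((xs.drop a).take m).sum := by
  induction m with
  | zero => simp
  | succ m ih =>
    rw [List.range_succ, List.map_append, List.sum_append,
        ih (by omega), List.sum_take_succ _ m (by simp; omega)]
    simp [List.getD, List.getElem_drop, List.getElem?_eq_getElem (by omega : a + m < xs.length)]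

-- A's inner loop computes the window sum
lemma innerA (arr : List Int) (M i : Int) (hM : 0 ≤ M) (h0 : 0 ≤ i) (h : i + M ≤ (arr.length : Int)) :
    (PySem.List.pyRange 0 M 1).foldl (fun s j => s + PySem.List.pyGetD arr (i + j) 0) 0
      = winSum arr M i.toNat := by
  rw [PySem.List.foldl_add, PySem.List.pyRange_one, List.map_map]
  simp only [Int.sub_zero]
  have hmap : ∀ k ∈ List.range M.toNat,
      ((fun j => PySem.List.pyGetD arr (i + j) 0) ∘ fun k : Nat => (0 : Int) + k) k
        = arr.getD (i.toNat + k) 0 := by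
    intro k hk
    simp only [Function.comp_apply, Int.zero_add]
    rw [show i + (k : Int) = ((i.toNat + k : Nat) : Int) by omega, PySem.List.pyGetD_natCast]
  rw [List.map_congr_left hmap, sum_range_getD arr i.toNat M.toNat (by omega)]
  simp [winSum]

-- sliding step: the window sum moves by one element in, one out
lemma winSum_succ (arr : List Int) (M : Int) (k : Nat) (hM : 1 ≤ M)
    (h : (k : Int) + M < (arr.length : Int)) :
    winSum arr M (k + 1) = winSum arr M k + arr.getD (k + M.toNat) 0 - arr.getD k 0 := by
  have hk : k < arr.length := by omega
  have hkm : k + M.toNat < arr.length := by omega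
  have hdrop : arr.drop k = arr[k] :: arr.drop (k + 1) := List.drop_eq_getElem_cons hk
  have h1 : winSum arr M k + arr.getD (k + M.toNat) 0
      = ((arr.drop k).take (M.toNat + 1)).sum := by
    rw [List.sum_take_succ _ M.toNat (by simp; omega)]
    simp [winSum, List.getElem_drop,
      List.getD, List.getElem?_eq_getElem (by omega : k + M.toNat < arr.length)]
  have h2 : ((arr.drop k).take (M.toNat + 1)).sum = arr[k] + winSum arr M (k + 1) := by
    rw [hdrop, List.take_succ_cons, List.sum_cons]
    simp only [winSum]
  have h3 : arr.getD k 0 = arr[k] :=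
    by simp [List.getD, List.getElem?_eq_getElem hk]
  omega

-- a fold whose step fixes the initial state leaves it unchanged
lemma foldl_fix {α β : Type} (f : β → α → β) (c : β) (h : ∀ x, f c x = c) :
    ∀ l : List α, l.foldl f c = c
  | [] => rfl
  | x :: t => by rw [List.foldl_cons, h x]; exact foldl_fix f c h t

-- fold over an empty-window range keeps the initial state (case M < 1)
lemma foldA_const (arr : List Int) (M : Int) (hM : M < 1) (l : List Int) :
    l.foldl (fun (st : Int × Int) i =>
      let summ := (PySem.List.pyRange 0 M 1).foldl
        (fun s j => s + PySem.List.pyGetD arr (i + j) 0) 0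
      (if summ > st.1 then summ else st.1,
       if summ < st.2 then summ else st.2)) (0, 10000 * M) = (0, 10000 * M) := by
  refine foldl_fix _ _ (fun x => ?_) l
  simp only [PySem.List.pyRange_one_eq_nil (show M ≤ 0 by omega), List.foldl_nil]
  simp [show ¬ ((0:Int) < 10000 * M) from by omega]

-- main loop correspondence, by induction on the number of sliding steps
lemma loops (arr : List Int) (M : Int) (hM : 1 ≤ M) (n : Nat)
    (hn : M + n ≤ (arr.length : Int)) :
    (PySem.List.pyRange M (M + n) 1).foldl
      (fun (st : Int × Int × Int) i =>
        let s := st.2.2 + PySem.List.pyGetD arr i 0 - PySem.List.pyGetD arr (i - M) 0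
        (max st.1 s, min st.2.1 s, s))
      (max 0 (winSum arr M 0), min (10000 * M) (winSum arr M 0), winSum arr M 0)
    = (((PySem.List.pyRange 0 ((n : Int) + 1) 1).foldl
        (fun (st : Int × Int) i =>
          let summ := (PySem.List.pyRange 0 M 1).foldl
            (fun s j => s + PySem.List.pyGetD arr (i + j) 0) 0
          (if summ > st.1 then summ else st.1,
           if summ < st.2 then summ else st.2)) (0, 10000 * M)).1,
       ((PySem.List.pyRange 0 ((n : Int) + 1) 1).foldl
        (fun (st : Int × Int) i =>
          let summ := (PySem.List.pyRange 0 M 1).foldl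
            (fun s j => s + PySem.List.pyGetD arr (i + j) 0) 0
          (if summ > st.1 then summ else st.1,
           if summ < st.2 then summ else st.2)) (0, 10000 * M)).2,
       winSum arr M n) := by
  induction n with
  | zero =>
    rw [show M + ((0:Nat):Int) = M by omega, PySem.List.pyRange_one_eq_nil (le_refl M),
        show ((0:Nat):Int) + 1 = 0 + 1 by omega, PySem.List.pyRange_one_singleton]
    rw [List.foldl_nil, List.foldl_cons, List.foldl_nil]
    rw [innerA arr M 0 (by omega) (by omega) (by omega)]
    simp only [show (Int.toNat 0) = 0 by rfl, Prod.mk.injEq, and_true]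
    exact ⟨by split_ifs <;> omega, by split_ifs <;> omega⟩
  | succ n ih =>
    have hn' : M + (n : Int) ≤ (arr.length : Int) := by push_cast at hn ⊢; omega
    push_cast
    rw [show (M + ((n : Int) + 1)) = (M + n) + 1 by ring,
        PySem.List.pyRange_one_succ_right (by omega : (M : Int) ≤ M + n),
        PySem.List.pyRange_one_succ_right (by omega : (0 : Int) ≤ (n : Int) + 1)]
    rw [List.foldl_append, List.foldl_append, ih hn']
    simp only [List.foldl_cons, List.foldl_nil]
    have hidx : M + (n : Int) - M = ((n : Nat) : Int) := by omega
    have hget1 : PySem.List.pyGetD arr (M + (n : Int)) 0 = arr.getD (M.toNat + n) 0 := by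
      rw [show M + (n : Int) = ((M.toNat + n : Nat) : Int) by omega, PySem.List.pyGetD_natCast]
    have hget2 : PySem.List.pyGetD arr (M + (n : Int) - M) 0 = arr.getD n 0 := by
      rw [hidx, PySem.List.pyGetD_natCast]
    have hslide : winSum arr M n + arr.getD (M.toNat + n) 0 - arr.getD n 0
        = winSum arr M (n + 1) := by
      rw [winSum_succ arr M n hM (by push_cast at hn ⊢; omega)]
      have : n + M.toNat = M.toNat + n := by omega
      rw [this]
    rw [innerA arr M ((n : Int) + 1) (by omega) (by omega) (by push_cast at hn ⊢; omega)]
    have htn : ((n : Int) + 1).toNat = n + 1 := by omega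
    rw [htn, hget1, hget2, hslide]
    simp only [Prod.mk.injEq, and_true]
    exact ⟨by split_ifs <;> omega, by split_ifs <;> omega⟩

-- B's initial window sum equals winSum at 0
lemma s0_eq (arr : List Int) (M : Int) (hM : 0 ≤ M) :
    (PySem.List.slice arr (some 0) (some M)).sum = winSum arr M 0 := by
  rw [PySem.List.slice_zero_start, PySem.List.slice_to arr hM]
  simp [winSum]

-- ===== VERDICT (by name: the statement is the Claim_ definition above) =====
theorem sum_sec_spec : Claim_equal_sum_sec := by
  intro N M arr _ hpre
  unfold Spec_sum_sec sum_sec sum_sec_alt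
  by_cases hg : 1 ≤ M ∧ M ≤ N
  · rw [if_pos hg]
    obtain ⟨hM, hMN⟩ := hg
    have hlen : N ≤ (arr.length : Int) := hpre hM hMN
    have hn : ∃ n : Nat, N = M + n := ⟨(N - M).toNat, by omega⟩
    obtain ⟨n, rfl⟩ := hn
    simp only
    rw [s0_eq arr M (by omega),
        show M + (n : Int) - M + 1 = (n : Int) + 1 by ring,
        loops arr M hM n hlen]
  · rw [if_neg hg]
    rcases (not_and_or.mp hg) with hM | hMN
    · rw [foldA_const arr M (by omega)]
    · rw [PySem.List.pyRange_one_eq_nil (by omega : N - M + 1 ≤ 0)]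
      rfl
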